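-- pv_equiv track=rewrite | github.com/pypi-data/pypi-mirror-58 | packages/kSpider/kSpider-1.0.2-py3-none-any.whl/src/pairwise/virtualQs_class.py | int_to_str
-- ===== SOURCE A (Python) =====
-- def int_to_str(kmer, kSize):
--     _map = {0: 'A', 1: 'C', 2: 'T', 3: 'G'}
--     kmer_str = ""
--     for i in range(kSize, 0, -1):
--         base = (kmer >> (i * 2 - 2)) & 3
--         ch = _map[base]
--         kmer_str += ch
--
--     return kmer_str
-- ===== SOURCE B (Python) =====
-- def int_to_str(kmer, kSize):
--     _map = {0: 'A', 1: 'C', 2: 'T', 3: 'G'}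
--     if kSize <= 0:
--         return ""
--     if kSize == 1:
--         return _map[kmer % 4]
--     half = kSize // 2
--     high, low = divmod(kmer, 4 ** half)
--     return int_to_str(high, kSize - half) + int_to_str(low, half)
-- ===== Notes on version B (the rewrite author's own statement) =====
-- stated objective: alternative
-- what changed: B decodes the k-mer by recursive divide-and-conquer: it splits kSize in half, uses divmod(kmer, 4**half) to split the integer into high and low parts, recurses on each and concatenates, instead of A's flat loop extracting each 2-bit group with a per-position shift and mask.
import Mathlib
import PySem

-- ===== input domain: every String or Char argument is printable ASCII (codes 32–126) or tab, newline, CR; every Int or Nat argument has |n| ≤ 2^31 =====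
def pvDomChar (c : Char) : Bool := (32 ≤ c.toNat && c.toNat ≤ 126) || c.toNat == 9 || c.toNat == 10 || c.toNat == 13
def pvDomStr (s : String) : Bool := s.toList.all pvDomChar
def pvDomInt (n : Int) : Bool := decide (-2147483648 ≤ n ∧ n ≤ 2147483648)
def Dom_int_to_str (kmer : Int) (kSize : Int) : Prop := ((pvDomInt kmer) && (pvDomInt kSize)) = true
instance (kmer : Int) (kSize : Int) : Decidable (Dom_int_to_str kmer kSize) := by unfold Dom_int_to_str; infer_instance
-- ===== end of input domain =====

-- B decodes by recursive divide-and-conquer — divmod(kmer, 4**half) splits the integer into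
-- high/low parts which are decoded independently and concatenated — instead of A's flat loop
-- extracting each 2-bit group with a per-position shift and mask; same values.

-- shared helper: the dict {0:'A',1:'C',2:'T',3:'G'} of both Pythons; the lookup argument is
-- always in {0,1,2,3} ((x & 3) in A, (x % 4) in B), so the KeyError branch is unreachable
-- and the default is never used.
def pvMapC (b : Int) : Char :=
  ((PySem.Dict.ofList [((0:Int),'A'),(1,'C'),(2,'T'),(3,'G')]).get? b).getD 'A'

-- ===== PORT A =====
-- kmer >> s with s ≥ 0 (here s = i*2-2, i ≥ 1 in the loop) is Lean's Int >>> s.toNat; & 3 is PySem.Int.band.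
def int_to_str (kmer : Int) (kSize : Int) : String :=
  (PySem.List.pyRange kSize 0 (-1)).foldl
    (fun kmer_str i =>
      let base := PySem.Int.band (kmer >>> ((i * 2 - 2).toNat)) 3
      let ch := pvMapC base
      kmer_str ++ String.singleton ch)
    ""

-- ===== PORT B =====
-- divmod(kmer, 4 ** half) is (PySem.Int.floordiv, PySem.Int.mod) by 4 ^ half; the divisor is a
-- positive power (half = kSize // 2 ≥ 1 on this branch), so its Nat exponent is half.toNat.
def int_to_str_alt (kmer : Int) (kSize : Int) : String :=
  if _h0 : kSize ≤ 0 then ""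
  else if _h1 : kSize = 1 then String.singleton (pvMapC (PySem.Int.mod kmer 4))
  else
    let half := PySem.Int.floordiv kSize 2
    let d : Int := 4 ^ half.toNat
    let high := PySem.Int.floordiv kmer d
    let low := PySem.Int.mod kmer d
    int_to_str_alt high (kSize - half) ++ int_to_str_alt low half
termination_by kSize.toNat
decreasing_by
  · have h2 : (2:Int) ≤ kSize := by omega
    have : PySem.Int.floordiv kSize 2 = kSize / 2 :=
      PySem.Int.floordiv_eq_ediv_of_pos (by omega)
    simp only [this]; omega
  · have h2 : (2:Int) ≤ kSize := by omega
    have : PySem.Int.floordiv kSize 2 = kSize / 2 :=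
      PySem.Int.floordiv_eq_ediv_of_pos (by omega)
    simp only [this]; omega

-- ===== PRECONDITION & SPEC =====
def Spec_int_to_str (kmer : Int) (kSize : Int) (out : String) : Prop := out = int_to_str_alt kmer kSize
instance (kmer : Int) (kSize : Int) (out : String) : Decidable (Spec_int_to_str kmer kSize out) := by unfold Spec_int_to_str; infer_instance

-- ===== CLAIM (what is proved, stated in full; the proofs are below) =====
def Claim_equal_int_to_str : Prop := ∀ (kmer : Int) (kSize : Int), Dom_int_to_str kmer kSize → Spec_int_to_str kmer kSize (int_to_str kmer kSize)

-- ===== LEMMAS AND PROOFS =====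

-- the 2-bit group t of x, written arithmetically (Python-floor division and mod, divisor > 0)
def pvDigit (x : Int) (t : Nat) : Int := PySem.Int.mod (PySem.Int.floordiv x (4 ^ t)) 4

-- both programs produce this character list
def pvSpecChars (x : Int) (n : Nat) : List Char :=
  (List.range n).map (fun j => pvMapC (pvDigit x (n - 1 - j)))

theorem pvDigit_eq_emod (x : Int) (t : Nat) : pvDigit x t = (x / 4 ^ t) % 4 := by
  unfold pvDigit
  rw [PySem.Int.floordiv_eq_ediv_of_pos (by positivity), PySem.Int.mod_eq_emod_of_pos (by omega)]

-- A's 2-bit extraction (shift + mask) computes pvDigit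
theorem pv_band3 (y : Int) : PySem.Int.band y 3 = y % 4 := by
  unfold PySem.Int.band
  have hmask : ∀ m : Nat, m &&& Int.toNat 3 = m % 4 := by
    intro m
    have := Nat.and_two_pow_sub_one_eq_mod m 2
    norm_num at this
    exact this
  split_ifs with ha hb hb
  · rw [hmask]
    omega
  · omega
  · rw [Nat.and_comm, hmask]
    omega
  · omega

theorem pv_shift_digit (x : Int) (t : Nat) :
    PySem.Int.band (x >>> ((2 * t : Nat) : Int)) 3 = pvDigit x t := by
  rw [Int.shiftRight_natCast_right, pv_band3, pvDigit_eq_emod, Int.shiftRight_eq_div_pow]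
  congr 2
  rw [pow_mul]
  norm_num

-- A's foldl pushes one character per loop index
theorem pv_foldl_push (c : Int → Char) (l : List Int) (acc : String) :
    l.foldl (fun s i => s ++ String.singleton (c i)) acc = acc ++ String.ofList (l.map c) := by
  induction l generalizing acc with
  | nil => simp
  | cons x xs ih =>
      rw [List.foldl_cons, ih, ← String.toList_inj]
      simp

theorem pv_A_chars (kmer : Int) (kSize : Int) :
    (int_to_str kmer kSize).toList = pvSpecChars kmer kSize.toNat := by
  unfold int_to_str pvSpecChars
  rw [pv_foldl_push, PySem.List.pyRange_neg_one]
  simp only [String.toList_append, String.toList_ofList, String.toList_empty, List.nil_append,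
    List.map_map]
  by_cases h : kSize ≤ 0
  · simp [show kSize.toNat = 0 by omega]
  · apply List.ext_getElem
    · simp
    · intro j h1 h2
      simp only [List.getElem_map, List.getElem_range, Function.comp_apply]
      have hj : j < kSize.toNat := by simpa using h2
      have he : ((kSize - (j:Int)) * 2 - 2).toNat = 2 * (kSize.toNat - 1 - j) := by omega
      rw [he]
      exact congrArg pvMapC (pv_shift_digit kmer (kSize.toNat - 1 - j))

-- splitting the integer splits its 2-bit groups: high part
theorem pv_digit_high (x : Int) (h t : Nat) :
    pvDigit (PySem.Int.floordiv x (4 ^ h)) t = pvDigit x (t + h) := by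
  rw [pvDigit_eq_emod, pvDigit_eq_emod,
    PySem.Int.floordiv_eq_ediv_of_pos (b := (4:Int) ^ h) (by positivity)]
  rw [Int.ediv_ediv_of_nonneg (by positivity), ← pow_add]
  ring_nf

-- low part: groups below the cut are unchanged by taking the remainder
theorem pv_digit_low (x : Int) (h t : Nat) (ht : t < h) :
    pvDigit (PySem.Int.mod x (4 ^ h)) t = pvDigit x t := by
  rw [pvDigit_eq_emod, pvDigit_eq_emod,
    PySem.Int.mod_eq_emod_of_pos (b := (4:Int) ^ h) (by positivity)]
  have hsplit : x % 4 ^ h = x + (-(x / 4 ^ h) * 4 ^ (h - t - 1) * 4) * 4 ^ t := by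
    have : (4:Int) ^ h = 4 ^ (h - t - 1) * 4 * 4 ^ t := by
      rw [← pow_succ, ← pow_add]; congr 1; omega
    rw [Int.emod_def, this]; ring
  rw [hsplit, Int.add_mul_ediv_right _ _ (by positivity), Int.add_mul_emod_self_right]

theorem pv_spec_split (x : Int) (n h : Nat) (h1 : 1 ≤ h) (h2 : h < n) :
    pvSpecChars x n =
      pvSpecChars (PySem.Int.floordiv x (4 ^ h)) (n - h) ++
      pvSpecChars (PySem.Int.mod x (4 ^ h)) h := by
  apply List.ext_getElem
  · simp [pvSpecChars]; omega
  · intro j hj1 hj2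
    have hjn : j < n := by simpa [pvSpecChars] using hj1
    rw [List.getElem_append]
    simp only [pvSpecChars, List.getElem_map, List.getElem_range, List.length_map,
      List.length_range]
    split_ifs with hcase
    · rw [pv_digit_high]
      congr 2
      omega
    · rw [pv_digit_low _ _ _ (by omega)]
      congr 2
      omega

theorem pv_B_chars (n : Nat) : ∀ (x : Int), (int_to_str_alt x (n : Int)).toList = pvSpecChars x n := by
  induction n using Nat.strong_induction_on with
  | _ n ih =>
    intro x
    rw [int_to_str_alt]
    rcases Nat.eq_zero_or_pos n with h0 | h0
    · subst h0; simp [pvSpecChars]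
    rcases Nat.lt_or_ge n 2 with h1 | h1
    · have : n = 1 := by omega
      subst this
      simp [pvSpecChars, pvDigit, List.range_succ]
    · have hle : ¬ ((n : Int) ≤ 0) := by omega
      have hne : ¬ ((n : Int) = 1) := by omega
      simp only [dif_neg hle, dif_neg hne]
      have hhalf : PySem.Int.floordiv (n : Int) 2 = ((n / 2 : Nat) : Int) := by
        rw [PySem.Int.floordiv_eq_ediv_of_pos (by omega)]; omega
      set h := n / 2 with hh
      have hh1 : 1 ≤ h := by omega
      have hh2 : h < n := by omega
      simp only [String.toList_append, hhalf]
      rw [show ((n : Int) - ((h : Nat) : Int)) = ((n - h : Nat) : Int) from by omega]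
      rw [ih (n - h) (by omega), ih h hh2]
      exact (pv_spec_split x n h hh1 hh2).symm

-- ===== VERDICT (by name: the statement is the Claim_ definition above) =====
theorem int_to_str_spec : Claim_equal_int_to_str := by
  intro kmer kSize _
  unfold Spec_int_to_str
  rw [← String.toList_inj, pv_A_chars]
  by_cases h : kSize ≤ 0
  · rw [int_to_str_alt]
    simp [dif_pos h, pvSpecChars, show kSize.toNat = 0 by omega]
  · have : kSize = ((kSize.toNat : Nat) : Int) := by omega
    conv_rhs => rw [this]
    rw [pv_B_chars]
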